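-- pv_equiv track=rewrite | github.com/davylis/PY | Chapter_7/matrix_sudoku_check_row.py | row_ok
-- ===== SOURCE A (Python) =====
-- def row_ok(matrix, index):
--     row = matrix[index]
--     seen=set()
--
--     for num in row:
--         if num != 0:
--             if num in seen:
--                 return False
--             seen.add(num)
--
--
--     return True
-- ===== SOURCE B (Python) =====
-- def row_ok(matrix, index):
--     nums = sorted(x for x in matrix[index] if x != 0)
--     return all(a != b for a, b in zip(nums, nums[1:]))
-- ===== Notes on version B (the rewrite author's own statement) =====
-- stated objective: alternative
-- what changed: Replaces the incremental seen-set with membership test and early return by sorting the nonzero entries and checking that no two adjacent sorted values are equal (duplicates become neighbours after sorting).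
import Mathlib
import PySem

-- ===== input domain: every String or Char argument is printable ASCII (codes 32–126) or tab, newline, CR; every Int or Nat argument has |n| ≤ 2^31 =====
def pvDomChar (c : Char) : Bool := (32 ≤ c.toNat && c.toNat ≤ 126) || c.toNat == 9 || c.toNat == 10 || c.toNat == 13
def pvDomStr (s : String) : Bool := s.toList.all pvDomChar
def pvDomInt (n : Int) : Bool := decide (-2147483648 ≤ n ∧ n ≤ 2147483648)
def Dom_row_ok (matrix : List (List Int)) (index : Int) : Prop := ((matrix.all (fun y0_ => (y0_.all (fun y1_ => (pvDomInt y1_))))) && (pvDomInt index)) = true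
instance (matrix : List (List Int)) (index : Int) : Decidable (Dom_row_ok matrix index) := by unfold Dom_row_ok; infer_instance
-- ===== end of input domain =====

-- B replaces A's incremental seen-set loop (membership test + early return) by a
-- different algorithm: sort the nonzero entries and check no adjacent pair is equal.

-- ===== PORT A =====
-- the 'for num in row' loop: seen-set accumulator, early return False on a repeat
def rowLoopA : List Int → PySem.Set Int → Bool
  | [], _ => true
  | num :: rest, seen =>
    if num ≠ 0 then
      if PySem.Set.contains seen num then false
      else rowLoopA rest (PySem.Set.add seen num)
    else rowLoopA rest seen

def row_ok (matrix : List (List Int)) (index : Int) : Bool :=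
  match PySem.List.pyGet? matrix index with
  | none => false   -- Python raises IndexError here; excluded by Pre_row_ok
  | some row => rowLoopA row PySem.Set.empty

-- ===== PORT B =====
def row_ok_alt (matrix : List (List Int)) (index : Int) : Bool :=
  match PySem.List.pyGet? matrix index with
  | none => false   -- Python raises IndexError here; excluded by Pre_row_ok
  | some row =>
    let nums := PySem.List.sorted (row.filter (fun x => decide (x ≠ 0))) (fun x => x) false
    (nums.zip (nums.drop 1)).all (fun p => decide (p.1 ≠ p.2))

-- ===== PRECONDITION & SPEC =====
-- exactly the inputs on which Python's matrix[index] does not raise IndexError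
def Pre_row_ok (matrix : List (List Int)) (index : Int) : Prop :=
  PySem.Raise.InRange matrix.length index
instance (matrix : List (List Int)) (index : Int) : Decidable (Pre_row_ok matrix index) := by
  unfold Pre_row_ok; infer_instance
def pvWitness_row_ok : List (List Int) × Int := ([[1, 2, 0], [3, 3]], 0)

def Spec_row_ok (matrix : List (List Int)) (index : Int) (out : Bool) : Prop := out = row_ok_alt matrix index
instance (matrix : List (List Int)) (index : Int) (out : Bool) : Decidable (Spec_row_ok matrix index out) := by unfold Spec_row_ok; infer_instance

-- ===== CLAIM (what is proved, stated in full; the proofs are below) =====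
def Claim_equal_row_ok : Prop := ∀ (matrix : List (List Int)) (index : Int), Dom_row_ok matrix index → Pre_row_ok matrix index → Spec_row_ok matrix index (row_ok matrix index)

-- ===== LEMMAS AND PROOFS =====

-- A's loop over 'row' with a Nodup seen-set decides Nodup of seen ++ nonzero entries
theorem rowLoopA_eq_decide_nodup (row : List Int) (seen : PySem.Set Int)
    (h : seen.Nodup) :
    rowLoopA row seen = decide ((seen ++ row.filter (fun x => decide (x ≠ 0))).Nodup) := by
  induction row generalizing seen with
  | nil => simp [rowLoopA, h]
  | cons num rest ih =>
    by_cases h0 : num = 0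
    · subst h0
      simp only [rowLoopA, ne_eq, not_true_eq_false, if_false, List.filter_cons]
      simpa using ih seen h
    · simp only [rowLoopA, ne_eq, h0, not_false_eq_true, if_true]
      by_cases hc : PySem.Set.contains seen num = true
      · have hmem : num ∈ seen := (PySem.Set.contains_iff seen num).1 hc
        rw [if_pos hc]
        have hnn : ¬ (seen ++ (num :: rest).filter (fun x => decide (x ≠ 0))).Nodup := by
          intro hnd
          rcases List.nodup_append.1 hnd with ⟨_, _, hdisj⟩
          exact hdisj num hmem num (by rw [List.filter_cons]; simp [h0]) rfl
        exact (decide_eq_false hnn).symm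
      · rw [if_neg hc]
        have hadd : PySem.Set.add seen num = seen ++ [num] := by
          unfold PySem.Set.add
          rw [if_neg hc]
        have hndadd : (PySem.Set.add seen num).Nodup := by
          rw [hadd]
          refine List.nodup_append.2 ⟨h, List.nodup_singleton _, ?_⟩
          intro a ha b hb
          simp only [List.mem_singleton] at hb
          intro heq
          rw [heq, hb] at ha
          exact hc ((PySem.Set.contains_iff seen num).2 ha)
        rw [ih _ hndadd, hadd]
        have hrw : (seen ++ [num]) ++ rest.filter (fun x => decide (x ≠ 0))
             = seen ++ (num :: rest).filter (fun x => decide (x ≠ 0)) := by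
          rw [List.filter_cons]; simp [h0]
        rw [hrw]

-- on a ≤-sorted list, the zip-with-tail adjacent-distinct test decides Nodup
theorem adjAll_eq_nodup : ∀ (l : List Int), l.Pairwise (· ≤ ·) →
    (l.zip (l.drop 1)).all (fun p => decide (p.1 ≠ p.2)) = decide l.Nodup
  | [], _ => by simp
  | [a], _ => by simp
  | a :: b :: t, hpw => by
    have hpw' : (b :: t).Pairwise (· ≤ ·) := hpw.tail
    have ih := adjAll_eq_nodup (b :: t) hpw'
    have hab : a ≤ b := (List.pairwise_cons.1 hpw).1 b (List.mem_cons_self)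
    simp only [List.drop_one, List.tail_cons, List.zip_cons_cons, List.all_cons] at ih ⊢
    rw [ih]
    by_cases h : a = b
    · subst h
      simp
    · have hnotmem : a ∉ b :: t := by
        intro hm
        rcases List.mem_cons.1 hm with h1 | h2
        · exact h h1
        · have hbt : b ≤ a := (List.pairwise_cons.1 hpw').1 a h2
          exact h (le_antisymm hab hbt)
      simp [h, List.nodup_cons, hnotmem]

-- ===== VERDICT (by name: the statement is the Claim_ definition above) =====
theorem row_ok_spec : Claim_equal_row_ok := by
  intro matrix index _ hpre
  unfold Spec_row_ok row_ok row_ok_alt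
  rcases hg : PySem.List.pyGet? matrix index with _ | row
  · rfl
  · simp only
    rw [rowLoopA_eq_decide_nodup row PySem.Set.empty List.nodup_nil]
    have hempty : (PySem.Set.empty ++ row.filter (fun x => decide (x ≠ 0)))
         = row.filter (fun x => decide (x ≠ 0)) := rfl
    rw [hempty]
    set fs := row.filter (fun x => decide (x ≠ 0)) with hfs
    set s := PySem.List.sorted fs (fun x => x) false with hs
    have hperm : s.Perm fs := PySem.List.sorted_perm fs (fun x => x) false
    have hpw : s.Pairwise (· ≤ ·) := PySem.List.sorted_pairwise fs (fun x => x)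
    rw [adjAll_eq_nodup s hpw, decide_eq_decide]
    exact hperm.nodup_iff.symm
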